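-- pv_equiv track=rewrite | github.com/itswillis/practice | LAB 20 Exam Revision/Q12.py | max_product_of_k
-- ===== SOURCE A (Python) =====
-- class PriorityQueue:
--     def __init__(self):
--         self.binary_heap = [0]  # Heap with a placeholder for easier child/parent calculations
--         self.size = 0
--
--     def percolate_up(self, i):
--         while i // 2 > 0 and self.binary_heap[i] > self.binary_heap[i // 2]:
--             self.binary_heap[i], self.binary_heap[i // 2] = self.binary_heap[i // 2], self.binary_heap[i]
--             i = i // 2
--
--     def insert(self, item):
--         self.binary_heap.append(item)
--         self.size += 1
--         self.percolate_up(self.size)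
--
--     def get_larger_child_index(self, i):
--         if i * 2 + 1 > self.size:
--             return i * 2
--         else:
--             if self.binary_heap[i * 2] > self.binary_heap[i * 2 + 1]:
--                 return i * 2
--             else:
--                 return i * 2 + 1
--
--     def percolate_down(self, i):
--         while i * 2 <= self.size:
--             mc = self.get_larger_child_index(i)
--             if self.binary_heap[i] < self.binary_heap[mc]:
--                 self.binary_heap[mc], self.binary_heap[i] = self.binary_heap[i], self.binary_heap[mc]
--             i = mc
--
--     def delete_maximum(self):
--         if self.size == 0:
--             return None
--         maximum_value = self.binary_heap[1]
--         self.binary_heap[1] = self.binary_heap[self.size]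
--         self.binary_heap.pop()
--         self.size -= 1
--         if self.size > 0:
--             self.percolate_down(1)
--         return maximum_value
--
-- def max_product_of_k(numbers, k):
--     if k > len(numbers):
--         return None
--     max_heap = PriorityQueue()
--     for number in numbers:
--         max_heap.insert(number)
--     max_product = 1
--     for _ in range(k):
--         max_product *= max_heap.delete_maximum()
--     return max_product
-- ===== SOURCE B (Python) =====
-- def max_product_of_k(numbers, k):
--     if k > len(numbers):
--         return None
--     ordered = sorted(numbers, reverse=True)
--     max_product = 1
--     for i in range(k):
--         max_product *= ordered[i]
--     return max_product
-- ===== Notes on version B (the rewrite author's own statement) =====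
-- stated objective: simpler
-- what changed: Drops the hand-rolled binary max-heap class (insert/percolate/delete-maximum) and instead sorts the list descending once and multiplies the first k elements.
import Mathlib
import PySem

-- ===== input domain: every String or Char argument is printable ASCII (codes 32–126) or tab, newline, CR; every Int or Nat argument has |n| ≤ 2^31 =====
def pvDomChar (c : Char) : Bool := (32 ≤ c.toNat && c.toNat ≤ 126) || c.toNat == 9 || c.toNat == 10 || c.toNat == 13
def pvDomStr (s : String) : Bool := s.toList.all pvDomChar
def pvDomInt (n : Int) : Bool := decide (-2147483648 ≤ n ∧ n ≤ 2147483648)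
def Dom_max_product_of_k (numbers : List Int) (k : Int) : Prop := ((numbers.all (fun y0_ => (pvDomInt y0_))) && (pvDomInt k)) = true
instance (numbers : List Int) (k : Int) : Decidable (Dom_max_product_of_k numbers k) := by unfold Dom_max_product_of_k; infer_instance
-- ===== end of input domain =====

-- B replaces A's hand-rolled binary max-heap (insert all, pop k times) by one descending sort
-- and a product of the first k elements; objective: simpler.

-- ===== PORT A =====
-- All list reads/writes in A happen at nonnegative in-range indices, so getI/setI
-- (getD/set at index.toNat) are exact transcriptions of binary_heap[i] there.
def getI (h : List Int) (i : Int) : Int := h.getD i.toNat 0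
def setI (h : List Int) (i : Int) (v : Int) : List Int := h.set i.toNat v

-- Python's i // 2: i ≥ 1 in every call of percolate_up, where floordiv i 2 = i / 2 (Int.ediv).
theorem pv_fdiv2 (a : Int) : PySem.Int.floordiv a 2 = a / 2 :=
  PySem.Int.floordiv_eq_ediv_of_pos (by norm_num)

-- PriorityQueue.percolate_up (the while loop; the tuple swap reads both old values first)
def percUp (h : List Int) (i : Int) : List Int :=
  if hc : 0 < PySem.Int.floordiv i 2 ∧ getI h (PySem.Int.floordiv i 2) < getI h i then
    percUp (setI (setI h i (getI h (PySem.Int.floordiv i 2))) (PySem.Int.floordiv i 2) (getI h i))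
      (PySem.Int.floordiv i 2)
  else h
termination_by i.toNat
decreasing_by simp only [pv_fdiv2] at *; omega

-- PriorityQueue.get_larger_child_index
def largerChild (h : List Int) (s i : Int) : Int :=
  if i * 2 + 1 > s then i * 2
  else if getI h (i * 2 + 1) < getI h (i * 2) then i * 2 else i * 2 + 1

theorem largerChild_bounds (h : List Int) (s i : Int) (h1 : 1 ≤ i) (h2 : i * 2 ≤ s) :
    i < largerChild h s i ∧ largerChild h s i ≤ s := by
  unfold largerChild; split_ifs <;> omega

-- PriorityQueue.percolate_down (the while loop). The extra '1 ≤ i' in the guard only makes the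
-- recursion total; every call in A has i = 1 ≥ 1 and the loop keeps i increasing, so it is exact.
def percDown (h : List Int) (s i : Int) : List Int :=
  if hc : 1 ≤ i ∧ i * 2 ≤ s then
    let mc := largerChild h s i
    percDown (if getI h i < getI h mc then setI (setI h mc (getI h i)) i (getI h mc) else h) s mc
  else h
termination_by (s + 1 - i).toNat
decreasing_by
  have := largerChild_bounds h s i hc.1 hc.2
  omega

-- PriorityQueue.insert; the state is (binary_heap, size)
def pqInsert (st : List Int × Int) (item : Int) : List Int × Int :=
  (percUp (st.1 ++ [item]) (st.2 + 1), st.2 + 1)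

-- PriorityQueue.delete_maximum; returns (result, new state); .pop() is dropLast
def pqDeleteMax (st : List Int × Int) : Option Int × (List Int × Int) :=
  if st.2 = 0 then (none, st)
  else
    let m := getI st.1 1
    let h2 := (setI st.1 1 (getI st.1 st.2)).dropLast
    let s' := st.2 - 1
    (some m, (if 0 < s' then percDown h2 s' 1 else h2, s'))

def max_product_of_k (numbers : List Int) (k : Int) : Option Int :=
  if (numbers.length : Int) < k then none
  else
    -- build the heap: PriorityQueue() starts as ([0], 0)
    let st := numbers.foldl (fun st n => pqInsert st n) ([0], 0)
    -- 'max_product *= max_heap.delete_maximum()': the popped Option is never none here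
    -- (k ≤ len(numbers) = heap size), so '.getD 0' is exact in every iteration
    some ((PySem.List.pyRange 0 k 1).foldl
      (fun (acc : Int × (List Int × Int)) _ =>
        ((acc.1 * ((pqDeleteMax acc.2).1.getD 0), (pqDeleteMax acc.2).2) : Int × (List Int × Int)))
      (1, st)).1

-- ===== PORT B =====
def max_product_of_k_alt (numbers : List Int) (k : Int) : Option Int :=
  if (numbers.length : Int) < k then none
  else
    let ordered := PySem.List.sorted numbers (fun x => x) true
    -- ordered[i]: every i in range(k) satisfies 0 ≤ i < k ≤ len(ordered), so pyGetD is exact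
    some ((PySem.List.pyRange 0 k 1).foldl (fun p i => p * PySem.List.pyGetD ordered i 0) 1)

-- ===== PRECONDITION & SPEC =====
def Spec_max_product_of_k (numbers : List Int) (k : Int) (out : Option Int) : Prop := out = max_product_of_k_alt numbers k
instance (numbers : List Int) (k : Int) (out : Option Int) : Decidable (Spec_max_product_of_k numbers k out) := by unfold Spec_max_product_of_k; infer_instance

-- ===== CLAIM (what is proved, stated in full; the proofs are below) =====
def Claim_equal_max_product_of_k : Prop := ∀ (numbers : List Int) (k : Int), Dom_max_product_of_k numbers k → Spec_max_product_of_k numbers k (max_product_of_k numbers k)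

-- ===== LEMMAS AND PROOFS =====

-- the max-heap property over 1-based indices (index 0 is the placeholder)
def IsHeap (h : List Int) : Prop :=
  ∀ j : Int, 2 ≤ j → j < (h.length : Int) → getI h j ≤ getI h (j / 2)

def HInv (st : List Int × Int) : Prop :=
  0 ≤ st.2 ∧ st.1.length = st.2.toNat + 1 ∧ IsHeap st.1

-- getI/setI basics
theorem length_setI (h : List Int) (i : Int) (v : Int) : (setI h i v).length = h.length := by
  simp [setI]

theorem getI_setI_eq (h : List Int) (i : Int) (v : Int) (h0 : 0 ≤ i) (hl : i < (h.length : Int)) :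
    getI (setI h i v) i = v := by
  simp [getI, setI, List.getD_eq_getElem?_getD, List.getElem?_set_self (by omega : i.toNat < h.length)]

theorem getI_setI_ne (h : List Int) (i j : Int) (v : Int) (h0 : 0 ≤ i) (h1 : 0 ≤ j) (hne : i ≠ j) :
    getI (setI h i v) j = getI h j := by
  simp [getI, setI, List.getD_eq_getElem?_getD, List.getElem?_set_ne (by omega : i.toNat ≠ j.toNat)]

theorem swap0 (t : List Int) (m : Nat) (hm : m < t.length) (c : Int) :
    (t[m] :: t.set m c).Perm (c :: t) := by
  induction t generalizing m with
  | nil => simp at hm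
  | cons d u ih =>
    cases m with
    | zero => simpa using List.Perm.swap c d u
    | succ m =>
      have hm' : m < u.length := by simpa using hm
      simp only [List.getElem_cons_succ, List.set_cons_succ]
      exact ((List.Perm.swap d u[m] (u.set m c)).trans ((ih m hm').cons d)).trans
        (List.Perm.swap c d u)

theorem swapN (h : List Int) (a b : Nat) (ha : a < h.length) (hb : b < h.length) (hne : a ≠ b) :
    ((h.set a (h[b]'hb)).set b (h[a]'ha)).Perm h := by
  induction h generalizing a b with
  | nil => simp at ha
  | cons c t ih =>
    cases a with
    | zero =>
      cases b with
      | zero => omega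
      | succ b =>
        simpa using swap0 t b (by simpa using hb) c
    | succ a =>
      cases b with
      | zero =>
        simpa using swap0 t a (by simpa using ha) c
      | succ b =>
        simpa using (ih a b (by simpa using ha) (by simpa using hb) (by omega)).cons c

theorem swap_perm (h : List Int) (i j : Int) (h0 : 0 ≤ i) (h1 : 0 ≤ j) (hne : i ≠ j)
    (hi : i < (h.length : Int)) (hj : j < (h.length : Int)) :
    ((setI (setI h i (getI h j)) j (getI h i))).Perm h := by
  have ha : i.toNat < h.length := by omega
  have hb : j.toNat < h.length := by omega
  have hne' : i.toNat ≠ j.toNat := by omega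
  simp only [getI, setI]
  rw [List.getD_eq_getElem h 0 hb, List.getD_eq_getElem h 0 ha]
  exact swapN h i.toNat j.toNat ha hb hne'

theorem head?_setI (h : List Int) (i : Int) (v : Int) (h1 : 1 ≤ i) :
    (setI h i v).head? = h.head? := by
  cases h with
  | nil => rfl
  | cons a t =>
    obtain ⟨n, hn⟩ : ∃ n, i.toNat = n + 1 := ⟨i.toNat - 1, by omega⟩
    simp [setI, hn]

theorem drop_one_perm (h' h : List Int) (hp : h'.Perm h) (hh : h'.head? = h.head?) :
    (h'.drop 1).Perm (h.drop 1) := by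
  cases h with
  | nil => simp [List.Perm.eq_nil hp]
  | cons a t =>
    cases h' with
    | nil => simp at hh
    | cons b t' =>
      simp at hh
      subst hh
      simpa using hp.cons_inv

-- ===== percolate_up =====
def UpInv (h : List Int) (i : Int) : Prop :=
  1 ≤ i ∧ i < (h.length : Int) ∧
  (∀ j : Int, 2 ≤ j → j < (h.length : Int) → j ≠ i → getI h j ≤ getI h (j / 2)) ∧
  (∀ j : Int, 2 ≤ j → j < (h.length : Int) → j / 2 = i → 1 ≤ i / 2 → getI h j ≤ getI h (i / 2))

theorem percUp_correct (h : List Int) (i : Int) :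
    UpInv h i → IsHeap (percUp h i) ∧ (percUp h i).Perm h ∧ (percUp h i).head? = h.head? := by
  induction h, i using percUp.induct with
  | case1 h i hc ih =>
    intro hInv
    obtain ⟨hi1, hil, hc3, hc4⟩ := hInv
    have hc0 := hc
    rw [percUp]
    rw [dif_pos hc0]
    rw [pv_fdiv2] at hc ih ⊢
    obtain ⟨hp0, hlt⟩ := hc
    have hi2 : 2 ≤ i := by omega
    set p := i / 2 with hp
    set h' := setI (setI h i (getI h p)) p (getI h i) with hh'
    have hpi : p < i := by omega
    have hlen' : (h'.length : Int) = (h.length : Int) := by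
      simp [hh', length_setI]
    have hpl : p < (h.length : Int) := by omega
    have gi : getI h' i = getI h p := by
      rw [hh', getI_setI_ne _ _ _ _ (by omega) (by omega) (by omega),
        getI_setI_eq _ _ _ (by omega) hil]
    have gp : getI h' p = getI h i := by
      rw [hh', getI_setI_eq _ _ _ (by omega) (by rw [length_setI]; exact hpl)]
    have gother : ∀ j : Int, 0 ≤ j → j ≠ i → j ≠ p → getI h' j = getI h j := by
      intro j hj0 hji hjp
      rw [hh', getI_setI_ne _ _ _ _ (by omega) hj0 (by omega),
        getI_setI_ne _ _ _ _ (by omega) hj0 (by omega)]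
    have hInv' : UpInv h' p := by
      refine ⟨by omega, by omega, ?_, ?_⟩
      · intro j hj2 hjl hjp
        have hjl' : j < (h.length : Int) := by omega
        by_cases hji : j = i
        · subst hji
          rw [gi, hp, gp]
          exact le_of_lt hlt
        · rw [gother j (by omega) hji hjp]
          by_cases hji2 : j / 2 = i
          · rw [hji2, gi]
            exact hc4 j hj2 hjl' hji2 (by omega)
          · by_cases hjp2 : j / 2 = p
            · rw [hjp2, gp]
              refine le_trans (hc3 j hj2 hjl' hji) ?_
              rw [hjp2]
              exact le_of_lt hlt
            · rw [gother (j / 2) (by omega) hji2 hjp2]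
              exact hc3 j hj2 hjl' hji
      · intro j hj2 hjl hjp2 hpp
        have hjl' : j < (h.length : Int) := by omega
        have hp2 : 2 ≤ p := by omega
        rw [gother (p / 2) (by omega) (by omega) (by omega)]
        have hple : getI h p ≤ getI h (p / 2) := hc3 p hp2 (by omega) (by omega)
        by_cases hji : j = i
        · subst hji
          rw [gi]
          exact hple
        · rw [gother j (by omega) hji (by omega)]
          refine le_trans (hc3 j hj2 hjl' hji) ?_
          rw [hjp2]
          exact hple
    obtain ⟨H1, H2, H3⟩ := ih hInv'
    refine ⟨H1, H2.trans ?_, H3.trans ?_⟩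
    · exact swap_perm h i p (by omega) (by omega) (by omega) hil hpl
    · rw [hh', head?_setI _ _ _ (by omega), head?_setI _ _ _ (by omega)]
  | case2 h i hc =>
    intro hInv
    obtain ⟨hi1, hil, hc3, hc4⟩ := hInv
    have hc0 := hc
    rw [percUp, dif_neg hc0]
    rw [pv_fdiv2] at hc
    refine ⟨?_, List.Perm.refl _, rfl⟩
    intro j hj2 hjl
    by_cases hji : j = i
    · subst hji
      have : ¬ getI h (j / 2) < getI h j := by
        intro hlt
        exact hc ⟨by omega, hlt⟩
      omega
    · exact hc3 j hj2 hjl hji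

-- ===== percolate_down =====
def DownInv (h : List Int) (s i : Int) : Prop :=
  (∀ j : Int, 2 ≤ j → j ≤ s → j / 2 ≠ i → getI h j ≤ getI h (j / 2)) ∧
  (∀ j : Int, 2 ≤ j → j ≤ s → j / 2 = i → 2 ≤ i → getI h j ≤ getI h (i / 2))

theorem largerChild_cases (h : List Int) (s i : Int) :
    largerChild h s i = i * 2 ∨ largerChild h s i = i * 2 + 1 := by
  unfold largerChild; split_ifs <;> simp

theorem largerChild_ge_left (h : List Int) (s i : Int) :
    getI h (i * 2) ≤ getI h (largerChild h s i) := by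
  unfold largerChild
  split_ifs with h1 h2
  · exact le_refl _
  · exact le_refl _
  · exact not_lt.mp h2

theorem largerChild_ge_right (h : List Int) (s i : Int) (hle : i * 2 + 1 ≤ s) :
    getI h (i * 2 + 1) ≤ getI h (largerChild h s i) := by
  unfold largerChild
  split_ifs with h1 h2
  · omega
  · exact le_of_lt h2
  · exact le_refl _

theorem percDown_correct (h : List Int) (s i : Int) :
    (h.length : Int) = s + 1 → 1 ≤ i → DownInv h s i →
    IsHeap (percDown h s i) ∧ (percDown h s i).Perm h ∧ (percDown h s i).head? = h.head? := by
  induction h, i using percDown.induct (s := s) with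
  | case1 h i hc mc ih =>
    intro hlen hi1 hInv
    have hc' : 1 ≤ i ∧ i * 2 ≤ s := hc
    obtain ⟨hi1', h2s⟩ := hc'
    have hmc : mc = largerChild h s i := rfl
    clear_value mc
    rw [percDown, dif_pos (⟨hi1', h2s⟩ : 1 ≤ i ∧ i * 2 ≤ s)]
    simp only []
    rw [← hmc]
    have hmcb : i < mc ∧ mc ≤ s := by rw [hmc]; exact largerChild_bounds h s i hi1' h2s
    have hmcc : mc = i * 2 ∨ mc = i * 2 + 1 := by rw [hmc]; exact largerChild_cases h s i
    have hgl : getI h (i * 2) ≤ getI h mc := by rw [hmc]; exact largerChild_ge_left h s i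
    have hgr : i * 2 + 1 ≤ s → getI h (i * 2 + 1) ≤ getI h mc := by
      intro hle; rw [hmc]; exact largerChild_ge_right h s i hle
    have hmc2 : mc / 2 = i := by omega
    by_cases hswap : getI h i < getI h mc
    · simp only [dif_pos hswap] at ih
      rw [if_pos hswap]
      set h' := setI (setI h mc (getI h i)) i (getI h mc) with hh'
      have hlen' : (h'.length : Int) = (h.length : Int) := by simp [hh', length_setI]
      have gi' : getI h' i = getI h mc := by
        rw [hh', getI_setI_eq _ _ _ (by omega) (by rw [length_setI]; omega)]
      have gmc' : getI h' mc = getI h i := by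
        rw [hh', getI_setI_ne _ _ _ _ (by omega) (by omega) (by omega),
          getI_setI_eq _ _ _ (by omega) (by omega)]
      have gother : ∀ j : Int, 0 ≤ j → j ≠ i → j ≠ mc → getI h' j = getI h j := by
        intro j hj0 hji hjmc
        rw [hh', getI_setI_ne _ _ _ _ (by omega) hj0 (by omega),
          getI_setI_ne _ _ _ _ (by omega) hj0 (by omega)]
      have hInv' : DownInv h' s mc := by
        constructor
        · intro j hj2 hjs hjmc
          by_cases hjmceq : j = mc
          · subst hjmceq
            rw [gmc', hmc2, gi']
            exact le_of_lt hswap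
          · by_cases hji : j = i
            · subst hji
              rw [gi', gother (j / 2) (by omega) (by omega) (by omega)]
              exact hInv.2 mc (by omega) (by omega) hmc2 (by omega)
            · rw [gother j (by omega) hji hjmceq]
              by_cases hji2 : j / 2 = i
              · rw [hji2, gi']
                rcases (by omega : j = i * 2 ∨ j = i * 2 + 1) with rfl | rfl
                · exact hgl
                · exact hgr (by omega)
              · rw [gother (j / 2) (by omega) hji2 (by omega)]
                exact hInv.1 j hj2 hjs hji2
        · intro j hj2 hjs hjmc2 hmcge
          rw [hmc2, gi', gother j (by omega) (by omega) (by omega), ← hjmc2]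
          exact hInv.1 j hj2 hjs (by omega)
      obtain ⟨H1, H2, H3⟩ := ih (by omega) (by omega) hInv'
      refine ⟨H1, H2.trans ?_, H3.trans ?_⟩
      · exact swap_perm h mc i (by omega) (by omega) (by omega) (by omega) (by omega)
      · rw [hh', head?_setI _ _ _ (by omega), head?_setI _ _ _ (by omega)]
    · simp only [dif_neg hswap] at ih
      rw [if_neg hswap]
      have hInv' : DownInv h s mc := by
        constructor
        · intro j hj2 hjs hjmc
          by_cases hji2 : j / 2 = i
          · rw [hji2]
            refine le_trans ?_ (not_lt.mp hswap)
            rcases (by omega : j = i * 2 ∨ j = i * 2 + 1) with rfl | rfl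
            · exact hgl
            · exact hgr (by omega)
          · exact hInv.1 j hj2 hjs hji2
        · intro j hj2 hjs hjmc2 hmcge
          rw [hmc2]
          refine le_trans ?_ (not_lt.mp hswap)
          rw [← hjmc2]
          exact hInv.1 j hj2 hjs (by omega)
      exact ih hlen (by omega) hInv'
  | case2 h i hc =>
    intro hlen hi1 hInv
    have hc' : ¬ (1 ≤ i ∧ i * 2 ≤ s) := hc
    rw [percDown, dif_neg hc']
    refine ⟨?_, .refl _, rfl⟩
    intro j hj2 hjl
    by_cases hji : j / 2 = i
    · exfalso
      rw [hlen] at hjl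
      omega
    · exact hInv.1 j hj2 (by omega) hji

-- the root of a heap bounds every element
theorem heap_le_root (h : List Int) (hh : IsHeap h) :
    ∀ j : Int, 1 ≤ j → j < (h.length : Int) → getI h j ≤ getI h 1 := by
  have H : ∀ n : Nat, ∀ j : Int, j.toNat ≤ n → 1 ≤ j → j < (h.length : Int) →
      getI h j ≤ getI h 1 := by
    intro n
    induction n with
    | zero => intro j hj h1 _; omega
    | succ n ihn =>
      intro j hj h1 hl
      by_cases hj2 : 2 ≤ j
      · exact le_trans (hh j hj2 hl) (ihn (j / 2) (by omega) (by omega) (by omega))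
      · have : j = 1 := by omega
        subst this
        exact le_refl _
  exact fun j => H j.toNat j (le_refl _)

theorem heap_mem_le_root (h : List Int) (hh : IsHeap h) :
    ∀ x ∈ h.drop 1, x ≤ getI h 1 := by
  intro x hx
  obtain ⟨m, hm, hxm⟩ := List.getElem_of_mem hx
  rw [List.getElem_drop] at hxm
  have hml : m + 1 < h.length := by
    have := List.length_drop (l := h) (i := 1) ▸ hm
    omega
  have hgx : getI h ((m : Int) + 1) = x := by
    have : ((m : Int) + 1).toNat = 1 + m := by omega
    rw [getI, this, List.getD_eq_getElem h 0 (by omega)]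
    exact hxm
  rw [← hgx]
  exact heap_le_root h hh ((m : Int) + 1) (by omega) (by omega)

-- ===== insert and build =====
theorem getI_append (h : List Int) (x : Int) (j : Int) (h0 : 0 ≤ j) (hj : j < (h.length : Int)) :
    getI (h ++ [x]) j = getI h j := by
  rw [getI, getI, List.getD_eq_getElem (h ++ [x]) 0 (by simp; omega),
    List.getD_eq_getElem h 0 (by omega)]
  exact List.getElem_append_left (by omega)

theorem insert_spec (st : List Int × Int) (item : Int) (hInv : HInv st) :
    HInv (pqInsert st item) ∧ ((pqInsert st item).1.drop 1).Perm (st.1.drop 1 ++ [item]) ∧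
      (pqInsert st item).2 = st.2 + 1 := by
  obtain ⟨h, s⟩ := st
  obtain ⟨hs0, hlen, hheap⟩ := hInv
  simp only at hs0 hlen hheap
  have hlenI : (h.length : Int) = s + 1 := by omega
  have hup : UpInv (h ++ [item]) (s + 1) := by
    refine ⟨by omega, by simp; omega, ?_, ?_⟩
    · intro j hj2 hjl hjne
      simp only [List.length_append, List.length_cons, List.length_nil] at hjl
      have hjh : j < (h.length : Int) := by push_cast at hjl; omega
      rw [getI_append _ _ _ (by omega) hjh, getI_append _ _ _ (by omega) (by omega)]
      exact hheap j hj2 hjh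
    · intro j hj2 hjl hje _
      simp only [List.length_append, List.length_cons, List.length_nil] at hjl
      push_cast at hjl
      omega
  obtain ⟨H1, H2, H3⟩ := percUp_correct (h ++ [item]) (s + 1) hup
  simp only [pqInsert]
  refine ⟨⟨by omega, ?_, H1⟩, ?_, by simp⟩
  · rw [H2.length_eq]
    simp
    omega
  · refine (drop_one_perm _ _ H2 H3).trans ?_
    rw [List.drop_append_of_le_length (by omega)]

theorem build_spec (numbers : List Int) : ∀ (st : List Int × Int), HInv st →
    HInv (numbers.foldl (fun st n => pqInsert st n) st) ∧
      ((numbers.foldl (fun st n => pqInsert st n) st).1.drop 1).Perm (st.1.drop 1 ++ numbers) ∧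
      (numbers.foldl (fun st n => pqInsert st n) st).2 = st.2 + numbers.length := by
  induction numbers with
  | nil => intro st hInv; exact ⟨hInv, by simp, by simp⟩
  | cons n ns ih =>
    intro st hInv
    obtain ⟨I1, P1, S1⟩ := insert_spec st n hInv
    obtain ⟨I2, P2, S2⟩ := ih (pqInsert st n) I1
    simp only [List.foldl_cons]
    refine ⟨I2, ?_, ?_⟩
    · refine P2.trans ?_
      have := P1.append_right ns
      simpa [List.append_assoc] using this
    · rw [S2, S1]
      simp
      omega

-- ===== delete_maximum =====
theorem deleteMax_spec (h : List Int) (s : Int) (hs : 0 < s) (hInv : HInv (h, s)) :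
    (pqDeleteMax (h, s)).1 = some (getI h 1) ∧
    (pqDeleteMax (h, s)).2.2 = s - 1 ∧
    HInv (pqDeleteMax (h, s)).2 ∧
    (getI h 1 :: ((pqDeleteMax (h, s)).2.1.drop 1)).Perm (h.drop 1) := by
  obtain ⟨hs0, hlen, hheap⟩ := hInv
  simp only at hs0 hlen hheap
  match h, hheap, hlen with
  | [], _, hlen => exact absurd hlen (by simp)
  | [a], _, hlen => exact absurd hlen (by simp; omega)
  | a :: b :: u, hheap, hlen =>
  by_cases hs1 : s = 1
  · subst hs1
    have hu0 : u.length = 0 := by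
      simp only [List.length_cons] at hlen
      omega
    obtain rfl : u = [] := List.eq_nil_of_length_eq_zero hu0
    have hr : pqDeleteMax ([a, b], 1) = (some b, ([a], 0)) := rfl
    rw [hr]
    refine ⟨by simp [getI], rfl, ⟨le_refl _, by simp, ?_⟩, ?_⟩
    · intro j hj2 hjl
      simp at hjl
      omega
    · have hb : getI [a, b] 1 = b := rfl
      rw [hb]
      simp
  · have hs2 : 2 ≤ s := by omega
    have hul : u.length = s.toNat - 1 := by simp at hlen; omega
    have hune : u ≠ [] := by
      intro e
      subst e
      simp at hul
      omega
    set w := u.getLast hune with hw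
    have hu : u.dropLast ++ [w] = u := List.dropLast_append_getLast hune
    have hvs : getI (a :: b :: u) s = w := by
      rw [getI, List.getD_eq_getElem _ 0 (by simp; omega)]
      simp only [show s.toNat = (u.length - 1) + 1 + 1 from by omega, List.getElem_cons_succ]
      rw [hw, List.getLast_eq_getElem]
    have hset : setI (a :: b :: u) 1 (getI (a :: b :: u) s) = a :: w :: u := by
      rw [hvs, setI]
      rfl
    have hdrop : (a :: w :: u).dropLast = a :: w :: u.dropLast := by
      conv_lhs => rw [← hu]
      rw [show a :: w :: (u.dropLast ++ [w]) = (a :: w :: u.dropLast) ++ [w] by simp,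
        List.dropLast_concat]
    have hlen2 : ((a :: w :: u.dropLast).length : Int) = (s - 1) + 1 := by
      simp [List.length_dropLast]
      omega
    have hag : ∀ j : Int, 2 ≤ j → j ≤ s - 1 → getI (a :: w :: u.dropLast) j = getI (a :: b :: u) j := by
      intro j hj2 hjs
      have hj : j.toNat = (j.toNat - 2) + 1 + 1 := by omega
      rw [getI, getI, hj]
      simp only [List.getD_cons_succ]
      have hk : j.toNat - 2 < u.dropLast.length := by simp [List.length_dropLast]; omega
      rw [List.getD_eq_getElem _ 0 hk, List.getD_eq_getElem _ 0 (by omega), List.getElem_dropLast]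
    have hinv2 : DownInv (a :: w :: u.dropLast) (s - 1) 1 := by
      constructor
      · intro j hj2 hjs hjne
        rw [hag j hj2 hjs, hag (j / 2) (by omega) (by omega)]
        exact hheap j hj2 (by simp; omega)
      · intro j _ _ _ h21
        omega
    obtain ⟨H1, H2, H3⟩ := percDown_correct (a :: w :: u.dropLast) (s - 1) 1 hlen2 (le_refl _) hinv2
    have hr : pqDeleteMax (a :: b :: u, s)
        = (some (getI (a :: b :: u) 1), (percDown (a :: w :: u.dropLast) (s - 1) 1, s - 1)) := by
      rw [pqDeleteMax, if_neg (by simp; omega)]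
      simp only [hset, hdrop, if_pos (by omega : (0 : Int) < s - 1)]
    rw [hr]
    refine ⟨rfl, rfl, ⟨by show (0 : Int) ≤ s - 1; omega, ?_, H1⟩, ?_⟩
    · show (percDown (a :: w :: u.dropLast) (s - 1) 1).length = (s - 1).toNat + 1
      rw [H2.length_eq]
      simp [List.length_dropLast]
      omega
    · have hb : getI (a :: b :: u) 1 = b := rfl
      rw [hb]
      have hd : ((percDown (a :: w :: u.dropLast) (s - 1) 1).drop 1).Perm (w :: u.dropLast) :=
        drop_one_perm _ _ H2 H3
      refine (hd.cons b).trans ?_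
      have hwu : (w :: u.dropLast).Perm u := by
        conv_rhs => rw [← hu]
        exact (List.perm_append_singleton w u.dropLast).symm
      exact hwu.cons b

-- ===== the pop loop =====
theorem pops_prod (l : List Int) : ∀ (st : List Int × Int) (acc : Int) (L : List Int),
    HInv st → (st.1.drop 1).Perm L → L.Pairwise (fun a b => b ≤ a) → l.length ≤ L.length →
    (l.foldl (fun (acc : Int × (List Int × Int)) _ =>
        ((acc.1 * ((pqDeleteMax acc.2).1.getD 0), (pqDeleteMax acc.2).2) : Int × (List Int × Int)))
      (acc, st)).1 = acc * (L.take l.length).prod := by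
  induction l with
  | nil => intro st acc L _ _ _ _; simp
  | cons c l ih =>
    intro st acc L hInv hP hS hn
    obtain ⟨h, s⟩ := st
    obtain ⟨hs0, hlen, hheap⟩ := hInv
    simp only at hs0 hlen hheap
    cases L with
    | nil => simp at hn
    | cons m' L' =>
      have hdl : (h.drop 1).length = (m' :: L').length := hP.length_eq
      have hs : 0 < s := by
        simp only [List.length_drop, List.length_cons] at hdl
        omega
      obtain ⟨D1, D2, D3, D4⟩ := deleteMax_spec h s hs ⟨hs0, hlen, hheap⟩
      have hmax : ∀ x ∈ h.drop 1, x ≤ getI h 1 := heap_mem_le_root h hheap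
      have hmem : getI h 1 ∈ h.drop 1 := D4.subset (List.mem_cons_self)
      have hm1 : getI h 1 ≤ m' := by
        rcases List.mem_cons.mp (hP.subset hmem) with he | hmm
        · exact le_of_eq he
        · exact List.rel_of_pairwise_cons hS hmm
      have hm2 : m' ≤ getI h 1 := hmax m' (hP.symm.subset (List.mem_cons_self))
      have hm : getI h 1 = m' := le_antisymm hm1 hm2
      have hP' : ((pqDeleteMax (h, s)).2.1.drop 1).Perm L' := by
        have hc := D4.trans hP
        rw [hm] at hc
        exact hc.cons_inv
      rw [List.foldl_cons]
      have hstep := ih (pqDeleteMax (h, s)).2 (acc * ((pqDeleteMax (h, s)).1.getD 0)) L' D3 hP'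
        (List.Pairwise.of_cons hS) (by simpa using hn)
      rw [hstep, D1]
      simp only [Option.getD_some, List.length_cons, List.take_succ_cons, List.prod_cons, hm]
      ring

-- ===== B's loop =====
theorem alt_loop (L : List Int) : ∀ (n : Nat), n ≤ L.length →
    (PySem.List.pyRange 0 (n : Int) 1).foldl (fun p i => p * PySem.List.pyGetD L i 0) 1
      = (L.take n).prod := by
  intro n
  induction n with
  | zero =>
    intro _
    rw [show ((0 : Nat) : Int) = 0 from rfl, PySem.List.pyRange_one_eq_nil (le_refl 0)]
    simp
  | succ n ih =>
    intro hn
    rw [show ((n + 1 : Nat) : Int) = (n : Int) + 1 from by push_cast; ring,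
      PySem.List.pyRange_one_succ_right (by omega : (0 : Int) ≤ (n : Int)), List.foldl_append]
    simp only [List.foldl_cons, List.foldl_nil]
    rw [ih (by omega), PySem.List.pyGetD_natCast, List.getD_eq_getElem _ _ (by omega),
      List.prod_take_succ _ _ (by omega)]

-- ===== VERDICT (by name: the statement is the Claim_ definition above) =====
theorem max_product_of_k_spec : Claim_equal_max_product_of_k := by
  intro numbers k _
  unfold Spec_max_product_of_k max_product_of_k max_product_of_k_alt
  by_cases hk : (numbers.length : Int) < k
  · rw [if_pos hk, if_pos hk]
  · rw [if_neg hk, if_neg hk]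
    simp only []
    have hInv0 : HInv (([0] : List Int), (0 : Int)) := by
      refine ⟨le_refl _, by simp, ?_⟩
      intro j hj2 hjl
      simp at hjl
      omega
    obtain ⟨I, P, S⟩ := build_spec numbers ([0], 0) hInv0
    set st := numbers.foldl (fun st n => pqInsert st n) ([0], 0) with hst
    set L := PySem.List.sorted numbers (fun x => x) true with hL
    have hLP : L.Perm numbers := PySem.List.sorted_perm numbers (fun x => x) true
    have hPL : (st.1.drop 1).Perm L := by
      refine (P.trans ?_).trans hLP.symm
      simp
    have hSort : L.Pairwise (fun a b => b ≤ a) := by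
      simpa using PySem.List.sorted_pairwise_rev numbers (fun x => x)
    have hLlen : L.length = numbers.length := by rw [hL, PySem.List.length_sorted]
    have hkn : (PySem.List.pyRange 0 k 1).length ≤ L.length := by
      rw [PySem.List.length_pyRange_one]
      omega
    rw [pops_prod (PySem.List.pyRange 0 k 1) st 1 L I hPL hSort hkn]
    rw [PySem.List.length_pyRange_one]
    by_cases hk0 : 0 ≤ k
    · have hkk : ((k - 0).toNat : Int) = k := by omega
      conv_rhs => rw [← hkk]
      rw [alt_loop L (k - 0).toNat (by omega), one_mul]
    · rw [show (k - 0).toNat = 0 from by omega, PySem.List.pyRange_one_eq_nil (by omega : k ≤ 0)]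
      simp
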